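-- pv_equiv track=rewrite | github.com/seqeralabs/seqera-kit | tw_pywrap/overwrite.py | _get_values_from_cmd_args
-- ===== SOURCE A (Python) =====
-- def _get_values_from_cmd_args(cmd_args, keys):
--     """
--     Return a dictionary of values from a list of command line arguments based
--     on a input list of keys.
--     """
--     values = {key: None for key in keys}
--     key = None
--
--     for arg in cmd_args:
--         if arg.startswith("--"):
--             key = arg[2:]
--         else:
--             if key and key in keys:
--                 values[key] = arg
--             key = None
--     return values
-- ===== SOURCE B (Python) =====
-- def _get_values_from_cmd_args(cmd_args, keys):
--     values = {key: None for key in keys}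
--     for arg, nxt in zip(cmd_args, cmd_args[1:]):
--         if arg.startswith("--"):
--             key = arg[2:]
--             if key and key in keys and not nxt.startswith("--"):
--                 values[key] = nxt
--     return values
-- ===== Notes on version B (the rewrite author's own statement) =====
-- stated objective: alternative
-- what changed: Replaced the threaded pending-key state machine over single args by a stateless single pass over adjacent pairs zip(cmd_args, cmd_args[1:]), assigning at each '--' flag by looking ahead at the next element.
import Mathlib
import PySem

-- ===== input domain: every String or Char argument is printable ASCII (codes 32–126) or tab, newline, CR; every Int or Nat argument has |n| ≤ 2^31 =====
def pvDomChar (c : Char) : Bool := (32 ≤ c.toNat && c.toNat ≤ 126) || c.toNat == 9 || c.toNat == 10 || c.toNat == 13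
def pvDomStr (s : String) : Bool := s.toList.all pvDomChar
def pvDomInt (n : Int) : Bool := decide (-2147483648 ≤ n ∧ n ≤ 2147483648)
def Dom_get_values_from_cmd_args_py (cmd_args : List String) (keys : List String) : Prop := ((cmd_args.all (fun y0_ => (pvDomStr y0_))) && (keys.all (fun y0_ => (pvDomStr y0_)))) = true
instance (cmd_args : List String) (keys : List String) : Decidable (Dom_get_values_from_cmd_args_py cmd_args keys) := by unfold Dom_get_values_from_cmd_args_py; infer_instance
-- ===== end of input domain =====

-- B replaces A's threaded pending-key state machine by a stateless pass over
-- adjacent pairs with look-ahead (objective: alternative decomposition, same cost).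

-- ===== PORT A =====
-- values = {key: None for key in keys}  (shared by both Pythons, line for line)
def pvInitDict (keys : List String) : PySem.Dict String (Option String) :=
  keys.foldl (fun d k => d.insert k none) PySem.Dict.empty

-- one iteration of A's loop body: state = (values, key)
def pvStepA (keys : List String)
    (st : PySem.Dict String (Option String) × Option String) (arg : String) :
    PySem.Dict String (Option String) × Option String :=
  if PySem.Str.startswith arg "--" then
    (st.1, some (PySem.Str.slice arg (some 2) none))
  else
    match st.2 with
    | some k =>
        (if k ≠ "" ∧ k ∈ keys then st.1.insert k (some arg) else st.1, none)
    | none => (st.1, none)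

def get_values_from_cmd_args_py (cmd_args : List String) (keys : List String) :
    List (String × Option String) :=
  ((cmd_args.foldl (pvStepA keys) (pvInitDict keys, none)).1).items

-- ===== PORT B =====
-- one iteration of B's loop body over a pair (arg, nxt)
def pvStepB (keys : List String)
    (d : PySem.Dict String (Option String)) (p : String × String) :
    PySem.Dict String (Option String) :=
  if PySem.Str.startswith p.1 "--" then
    let key := PySem.Str.slice p.1 (some 2) none
    if key ≠ "" ∧ key ∈ keys ∧ PySem.Str.startswith p.2 "--" = false then
      d.insert key (some p.2)
    else d
  else d

def get_values_from_cmd_args_py_alt (cmd_args : List String) (keys : List String) :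
    List (String × Option String) :=
  ((cmd_args.zip (PySem.List.slice cmd_args (some 1) none)).foldl
      (pvStepB keys) (pvInitDict keys)).items

-- ===== PRECONDITION & SPEC =====
def Spec_get_values_from_cmd_args_py (cmd_args : List String) (keys : List String) (out : List (String × Option String)) : Prop := out = get_values_from_cmd_args_py_alt cmd_args keys
instance (cmd_args : List String) (keys : List String) (out : List (String × Option String)) : Decidable (Spec_get_values_from_cmd_args_py cmd_args keys out) := by unfold Spec_get_values_from_cmd_args_py; infer_instance

-- ===== CLAIM (what is proved, stated in full; the proofs are below) =====
def Claim_equal_get_values_from_cmd_args_py : Prop := ∀ (cmd_args : List String) (keys : List String), Dom_get_values_from_cmd_args_py cmd_args keys → Spec_get_values_from_cmd_args_py cmd_args keys (get_values_from_cmd_args_py cmd_args keys)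

-- ===== LEMMAS AND PROOFS =====

-- A's pending key after having just processed element x
def pvPend (x : String) : Option String :=
  if PySem.Str.startswith x "--" then some (PySem.Str.slice x (some 2) none) else none

-- one A-step from a state whose pending key came from the previous element x
-- is exactly one B-step on the pair (x, y), with the new pending key pvPend y
theorem pvStep_eq (keys : List String) (d : PySem.Dict String (Option String))
    (x y : String) :
    pvStepA keys (d, pvPend x) y = (pvStepB keys d (x, y), pvPend y) := by
  by_cases hy : PySem.Chars.startswith y.toList ['-', '-'] = true
  · by_cases hx : PySem.Chars.startswith x.toList ['-', '-'] = true
    · simp [pvStepA, pvStepB, pvPend, hy, hx]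
    · simp [pvStepA, pvStepB, pvPend, hy, hx]
  · by_cases hx : PySem.Chars.startswith x.toList ['-', '-'] = true
    · simp [pvStepA, pvStepB, pvPend, hy, hx]
    · simp [pvStepA, pvStepB, pvPend, hy, hx]

-- core invariant: running A's loop on l with pending key pvPend x equals
-- running B's pair loop on (x :: l).zip l from the same dict
theorem pvAB_eq (keys : List String) : ∀ (l : List String) (x : String)
    (d : PySem.Dict String (Option String)),
    (l.foldl (pvStepA keys) (d, pvPend x)).1
      = ((x :: l).zip l).foldl (pvStepB keys) d := by
  intro l
  induction l with
  | nil => intro x d; simp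
  | cons y rest ih =>
    intro x d
    rw [List.zip_cons_cons, List.foldl_cons, List.foldl_cons, pvStep_eq, ih y]

-- ===== VERDICT (by name: the statement is the Claim_ definition above) =====
theorem get_values_from_cmd_args_py_spec : Claim_equal_get_values_from_cmd_args_py := by
  intro cmd_args keys _
  unfold Spec_get_values_from_cmd_args_py
  unfold get_values_from_cmd_args_py get_values_from_cmd_args_py_alt
  rw [PySem.List.slice_from_one]
  have hempty : (none : Option String) = pvPend "" := by simp [pvPend, PySem.Chars.startswith]
  cases cmd_args with
  | nil => simp
  | cons y rest =>
    rw [hempty, pvAB_eq keys (y :: rest) "" (pvInitDict keys),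
      List.zip_cons_cons, List.foldl_cons]
    have h2 : pvStepB keys (pvInitDict keys) ("", y) = pvInitDict keys := by
      simp [pvStepB, PySem.Chars.startswith]
    rw [h2]
    simp
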